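-- pv_equiv track=rewrite | github.com/priyabratanayak/seatAllocate | Front End/Seat_Allocation_5days.py | get_Index_of_Combination
-- ===== SOURCE A (Python) =====
-- def get_Index_of_Combination(list_city,combined_sum_city):
--     list_city_index=[ind for ind in range(len(list_city))]
--     temp_list_city=list_city.copy()
--     index_temp=[]
--     info_index=[]
--     info_index_all=[]
--     info_data_all=[]
--
--     info_data=[]
--
--     for  city_list in combined_sum_city:
--
--         info_index.clear()
--         info_data.clear()
--         for city in city_list:
--
--             for ind,data2 in enumerate(temp_list_city):
--                 if city ==data2:
--                     if ind not in info_index: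
--                         info_index.append(ind)
--                         info_data.append(data2)
--                         break
--
--         info_index_all.append(info_index.copy())
--         info_data_all.append(info_data.copy())
--     return info_index_all,info_data_all
-- ===== SOURCE B (Python) =====
-- def get_Index_of_Combination(list_city, combined_sum_city):
--     # Build value -> ascending list of its indices once; per sublist, pop the
--     # next unused index per value from a (cheaply re-initialised) remaining map.
--     pos = {}
--     for i, v in enumerate(list_city):
--         pos.setdefault(v, []).append(i)
--     info_index_all = []
--     info_data_all = []
--     for city_list in combined_sum_city:
--         rem = dict(pos)
--         idxs = []
--         dats = []
--         for city in city_list: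
--             r = rem.get(city, [])
--             if r:
--                 idxs.append(r[0])
--                 dats.append(city)
--                 rem[city] = r[1:]
--         info_index_all.append(idxs)
--         info_data_all.append(dats)
--     return info_index_all, info_data_all
-- ===== Notes on version B (the rewrite author's own statement) =====
-- stated objective: faster
-- what changed: Replaces the per-city linear rescan of list_city (guarded by an 'index not in info_index' list-membership scan) with a value->indices dict built once, from which each sublist pops the next unused index per value in O(1).
import Mathlib
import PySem

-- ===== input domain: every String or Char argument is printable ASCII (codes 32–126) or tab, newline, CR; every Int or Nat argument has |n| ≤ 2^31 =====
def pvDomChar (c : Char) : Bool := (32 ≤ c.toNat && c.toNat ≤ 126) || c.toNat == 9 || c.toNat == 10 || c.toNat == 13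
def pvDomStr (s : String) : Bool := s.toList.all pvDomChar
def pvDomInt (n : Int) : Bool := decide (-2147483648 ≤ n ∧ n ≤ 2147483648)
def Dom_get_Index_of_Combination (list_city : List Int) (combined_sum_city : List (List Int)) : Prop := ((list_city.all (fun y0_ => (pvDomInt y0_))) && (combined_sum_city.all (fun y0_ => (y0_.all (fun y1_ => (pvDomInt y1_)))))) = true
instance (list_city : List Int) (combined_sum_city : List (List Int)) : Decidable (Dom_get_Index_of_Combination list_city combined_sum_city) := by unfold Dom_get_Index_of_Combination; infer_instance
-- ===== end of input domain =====

-- B replaces A's per-city rescans of list_city with a value->indices dict built once (faster; asymptotic).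


-- ===== PORT A =====
-- inner 'for ind,data2 in enumerate(temp_list_city): …' scan, with running index j
def pvAScan (temp : List Int) (j : Int) (city : Int) (ii idd : List Int) : List Int × List Int :=
  match temp with
  | [] => (ii, idd)
  | d :: rest =>
    if city = d then
      if ii.contains j then pvAScan rest (j + 1) city ii idd
      else (ii ++ [j], idd ++ [d])
    else pvAScan rest (j + 1) city ii idd

-- 'for city in city_list: …'
def pvAInner (temp : List Int) (cities : List Int) (ii idd : List Int) : List Int × List Int :=
  match cities with
  | [] => (ii, idd)
  | c :: rest =>
    let st := pvAScan temp 0 c ii idd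
    pvAInner temp rest st.1 st.2

-- 'for city_list in combined_sum_city: …'
def pvAOuter (temp : List Int) (ls : List (List Int)) (a1 a2 : List (List Int)) : List (List Int) × List (List Int) :=
  match ls with
  | [] => (a1, a2)
  | cl :: rest =>
    let st := pvAInner temp cl [] []
    pvAOuter temp rest (a1 ++ [st.1]) (a2 ++ [st.2])

def get_Index_of_Combination (list_city : List Int) (combined_sum_city : List (List Int)) : List (List Int) × List (List Int) :=
  let temp_list_city := list_city
  pvAOuter temp_list_city combined_sum_city [] []

-- ===== PORT B =====
-- 'pos = {}; for i, v in enumerate(list_city): pos.setdefault(v, []).append(i)'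
def pvPos (list_city : List Int) : PySem.Dict Int (List Int) :=
  (PySem.List.enumerate list_city 0).foldl (fun d p => d.modify p.2 [] (· ++ [p.1])) PySem.Dict.empty

-- 'for city in city_list: r = rem.get(city, []); if r: …'
def pvBInner (cities : List Int) (rem : PySem.Dict Int (List Int)) (idxs dats : List Int) : List Int × List Int :=
  match cities with
  | [] => (idxs, dats)
  | c :: rest =>
    match rem.getD c [] with
    | [] => pvBInner rest rem idxs dats
    | i :: t => pvBInner rest (rem.insert c t) (idxs ++ [i]) (dats ++ [c])

def pvBOuter (pos : PySem.Dict Int (List Int)) (ls : List (List Int)) (a1 a2 : List (List Int)) : List (List Int) × List (List Int) :=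
  match ls with
  | [] => (a1, a2)
  | cl :: rest =>
    let st := pvBInner cl pos [] []
    pvBOuter pos rest (a1 ++ [st.1]) (a2 ++ [st.2])

def get_Index_of_Combination_alt (list_city : List Int) (combined_sum_city : List (List Int)) : List (List Int) × List (List Int) :=
  pvBOuter (pvPos list_city) combined_sum_city [] []

-- ===== PRECONDITION & SPEC =====
def Spec_get_Index_of_Combination (list_city : List Int) (combined_sum_city : List (List Int)) (out : List (List Int) × List (List Int)) : Prop := out = get_Index_of_Combination_alt list_city combined_sum_city
instance (list_city : List Int) (combined_sum_city : List (List Int)) (out : List (List Int) × List (List Int)) : Decidable (Spec_get_Index_of_Combination list_city combined_sum_city out) := by unfold Spec_get_Index_of_Combination; infer_instance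

-- ===== CLAIM (what is proved, stated in full; the proofs are below) =====
def Claim_equal_get_Index_of_Combination : Prop := ∀ (list_city : List Int) (combined_sum_city : List (List Int)), Dom_get_Index_of_Combination list_city combined_sum_city → Spec_get_Index_of_Combination list_city combined_sum_city (get_Index_of_Combination list_city combined_sum_city)

-- ===== LEMMAS AND PROOFS =====

-- ascending indices (from j) at which v occurs in l
def pvPositions (l : List Int) (j : Int) (v : Int) : List Int :=
  match l with
  | [] => []
  | x :: rest => if x = v then j :: pvPositions rest (j + 1) v else pvPositions rest (j + 1) v

theorem pvPositions_lb (l : List Int) (j v i : Int) (h : i ∈ pvPositions l j v) : j ≤ i := by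
  induction l generalizing j with
  | nil => simp [pvPositions] at h
  | cons x rest ih =>
    simp only [pvPositions] at h
    split at h
    · rcases List.mem_cons.1 h with h' | h'
      · omega
      · have := ih (j + 1) h'; omega
    · have := ih (j + 1) h; omega

theorem pvPositions_pairwise (l : List Int) (j v : Int) : (pvPositions l j v).Pairwise (· < ·) := by
  induction l generalizing j with
  | nil => simp [pvPositions]
  | cons x rest ih =>
    simp only [pvPositions]
    split
    · exact List.Pairwise.cons (fun i hi => by have := pvPositions_lb rest (j+1) v i hi; omega) (ih (j+1))
    · exact ih (j + 1)

theorem pvPositions_nodup (l : List Int) (j v : Int) : (pvPositions l j v).Nodup :=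
  (pvPositions_pairwise l j v).imp (fun h => by omega)

theorem pvPositions_disjoint (l : List Int) (j v w i : Int) (hvw : v ≠ w)
    (hv : i ∈ pvPositions l j v) : i ∉ pvPositions l j w := by
  induction l generalizing j with
  | nil => simp [pvPositions] at hv
  | cons x rest ih =>
    simp only [pvPositions] at hv ⊢
    intro hw
    by_cases hxv : x = v
    · simp [hxv] at hv
      have hxw : x ≠ w := by rw [hxv]; exact hvw
      simp [hxw] at hw
      rcases hv with h | h
      · have := pvPositions_lb rest (j+1) w i hw; omega
      · exact ih (j+1) h hw
    · simp [hxv] at hv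
      by_cases hxw : x = w
      · simp [hxw] at hw
        rcases hw with h | h
        · have := pvPositions_lb rest (j+1) v i hv; omega
        · exact ih (j+1) hv h
      · simp [hxw] at hw; exact ih (j+1) hv hw

-- A's inner scan returns the first occurrence index of city not yet in ii
theorem pvAScan_eq (temp : List Int) (j city : Int) (ii idd : List Int) :
    pvAScan temp j city ii idd =
      match (pvPositions temp j city).filter (fun i => !ii.contains i) with
      | [] => (ii, idd)
      | i :: _ => (ii ++ [i], idd ++ [city]) := by
  induction temp generalizing j with
  | nil => simp [pvAScan, pvPositions]
  | cons d rest ih =>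
    simp only [pvAScan, pvPositions]
    by_cases hc : city = d
    · have hd : d = city := hc.symm
      simp only [if_pos hc, if_pos hd]
      by_cases hmem : j ∈ ii
      · simp [List.filter, hmem, ih]
      · simp [List.filter, hmem, hd]
    · have hd : ¬ d = city := fun h => hc h.symm
      simp only [if_neg hc, if_neg hd]
      exact ih (j + 1)

-- the invariant: rem.getD v [] is exactly the not-yet-used positions of v
theorem pvInner_eq (temp : List Int) (cities : List Int) (ii idd : List Int)
    (rem : PySem.Dict Int (List Int))
    (hinv : ∀ v, rem.getD v [] = (pvPositions temp 0 v).filter (fun i => !ii.contains i)) :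
    pvAInner temp cities ii idd = pvBInner cities rem ii idd := by
  induction cities generalizing ii idd rem with
  | nil => simp [pvAInner, pvBInner]
  | cons c rest ih =>
    simp only [pvAInner, pvBInner, pvAScan_eq]
    rw [hinv c]
    cases hF : (pvPositions temp 0 c).filter (fun i => !ii.contains i) with
    | nil => exact ih ii idd rem hinv
    | cons i t =>
      have hiF : i ∈ (pvPositions temp 0 c).filter (fun i => !ii.contains i) := by
        rw [hF]; exact List.mem_cons_self
      have hipos : i ∈ pvPositions temp 0 c := (List.mem_filter.1 hiF).1
      have hFnd : ((pvPositions temp 0 c).filter (fun i => !ii.contains i)).Nodup :=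
        (pvPositions_nodup temp 0 c).filter _
      have hit : i ∉ t := by rw [hF] at hFnd; exact (List.nodup_cons.1 hFnd).1
      refine ih _ _ _ (fun v => ?_)
      by_cases hvc : v = c
      · subst hvc
        rw [PySem.Dict.getD_insert_self]
        have : ∀ x : Int, (!(ii ++ [i]).contains x) = ((!(x == i)) && !ii.contains x) := by
          intro x
          by_cases h1 : x ∈ ii <;> by_cases h2 : x = i <;> simp [h1, h2]
        rw [List.filter_congr (fun x _ => this x)]
        rw [← List.filter_filter, hF]
        have hstep : List.filter (fun x => !x == i) (i :: t) = List.filter (fun x => !x == i) t := by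
          simp [List.filter]
        rw [hstep]
        exact ((List.filter_eq_self).2 (fun x hx => by
          have hne : x ≠ i := fun h => hit (h ▸ hx)
          simp [hne])).symm
      · rw [PySem.Dict.getD_insert_of_ne _ _ _ hvc, hinv v]
        refine List.filter_congr (fun x hx => ?_)
        have hxi : x ≠ i := by
          intro h; subst h
          exact pvPositions_disjoint temp 0 c v x (fun h => hvc h.symm) hipos hx
        simp [hxi]

theorem pvPos_getD (l : List Int) (s : Int) (d : PySem.Dict Int (List Int)) (v : Int) :
    ((PySem.List.enumerate l s).foldl (fun d p => d.modify p.2 [] (· ++ [p.1])) d).getD v []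
      = d.getD v [] ++ pvPositions l s v := by
  induction l generalizing s d with
  | nil => simp [PySem.List.enumerate_nil, pvPositions]
  | cons x rest ih =>
    rw [PySem.List.enumerate_cons]
    simp only [List.foldl_cons, pvPositions]
    rw [ih]
    by_cases hvx : v = x
    · subst hvx; rw [PySem.Dict.getD_modify_self]; simp
    · rw [PySem.Dict.getD_modify_of_ne _ _ _ hvx]
      simp [Ne.symm hvx]

theorem pvOuter_eq (temp : List Int) (ls : List (List Int)) (a1 a2 : List (List Int)) :
    pvAOuter temp ls a1 a2 = pvBOuter (pvPos temp) ls a1 a2 := by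
  induction ls generalizing a1 a2 with
  | nil => simp [pvAOuter, pvBOuter]
  | cons cl rest ih =>
    simp only [pvAOuter, pvBOuter]
    rw [pvInner_eq temp cl [] [] (pvPos temp) (fun v => by
      rw [pvPos, pvPos_getD]
      simp)]
    exact ih _ _

-- ===== VERDICT (by name: the statement is the Claim_ definition above) =====
theorem get_Index_of_Combination_spec : Claim_equal_get_Index_of_Combination := by
  intro list_city combined_sum_city _
  unfold Spec_get_Index_of_Combination get_Index_of_Combination get_Index_of_Combination_alt
  exact pvOuter_eq list_city combined_sum_city [] []
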